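-- pv_equiv track=rewrite | github.com/sagemath/sage-archive-2023-02-01 | src/sage/combinat/combinat.py | _tuples_native
-- ===== SOURCE A (Python) =====
-- def _tuples_native(S, k):
--     """
--     Return a list of all `k`-tuples of elements of a given set ``S``.
--
--     This is a helper method used in :meth:`tuples`. It returns the
--     same as ``tuples(S, k, algorithm="native")``.
--
--     EXAMPLES::
--
--         sage: S = [1,2,2]
--         sage: from sage.combinat.combinat import _tuples_native
--         sage: _tuples_native(S,2)
--         [(1, 1), (2, 1), (2, 1), (1, 2), (2, 2), (2, 2),
--          (1, 2), (2, 2), (2, 2)]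
--     """
--     if k <= 0:
--         return [()]
--     if k == 1:
--         return [(x,) for x in S]
--     ans = []
--     for s in S:
--         for x in _tuples_native(S, k-1):
--             y = list(x)
--             y.append(s)
--             ans.append(tuple(y))
--     return ans
-- ===== SOURCE B (Python) =====
-- def _tuples_native(S, k):
--     # Iterative bottom-up build: each level of (j-1)-tuples is computed once
--     # and extended by every element of S, instead of A's recursive recomputation.
--     levels = [()]
--     for _ in range(k):
--         levels = [x + (s,) for s in S for x in levels]
--     return levels
-- ===== Notes on version B (the rewrite author's own statement) =====
-- stated objective: faster
-- what changed: Replaced A's recursion that recomputes the full (k-1)-tuple list once per element of S with an iterative bottom-up loop that builds each level of tuples exactly once and extends it by every element of S.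
import Mathlib
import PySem

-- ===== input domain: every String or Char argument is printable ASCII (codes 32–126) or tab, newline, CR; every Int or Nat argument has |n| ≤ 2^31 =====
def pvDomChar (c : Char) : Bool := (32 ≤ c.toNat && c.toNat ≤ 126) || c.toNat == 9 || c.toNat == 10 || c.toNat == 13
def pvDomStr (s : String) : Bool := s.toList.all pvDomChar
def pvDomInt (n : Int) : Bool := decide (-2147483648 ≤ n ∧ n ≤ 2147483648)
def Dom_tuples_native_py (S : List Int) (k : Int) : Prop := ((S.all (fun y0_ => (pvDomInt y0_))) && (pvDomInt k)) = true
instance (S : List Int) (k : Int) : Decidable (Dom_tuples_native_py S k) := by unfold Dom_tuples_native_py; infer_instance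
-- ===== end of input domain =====

-- ===== PORT A =====
-- Literal port of A: recursion on k; the inner loops become a foldl over S
-- appending the mapped recomputation of the (k-1)-level, as in A's nested loops.
def tuples_native_py (S : List Int) (k : Int) : List (List Int) :=
  if k ≤ 0 then [[]]
  else if k = 1 then S.map (fun x => [x])
  else S.foldl (fun ans s => ans ++ (tuples_native_py S (k - 1)).map (fun x => x ++ [s])) []
termination_by k.toNat
decreasing_by omega

-- ===== PORT B =====
-- Port of B: a fold over range(k) ('for _ in range(k)'), each step replacing the
-- level by the comprehension [x + (s,) for s in S for x in levels] (a flatMap).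
def tuples_native_py_alt (S : List Int) (k : Int) : List (List Int) :=
  (List.range k.toNat).foldl (fun levels _ => S.flatMap (fun s => levels.map (fun x => x ++ [s]))) [[]]

-- ===== PRECONDITION & SPEC =====
-- Pre_ excludes nonempty S with large k, on which Python A's recursion of depth k
-- exceeds CPython's recursion limit and raises RecursionError; the bound 900 is a
-- conservative margin under the default limit of 1000 (A returns for nonempty S
-- only when k stays below that limit).
def Pre_tuples_native_py (S : List Int) (k : Int) : Prop := S = [] ∨ k ≤ 900
instance (S : List Int) (k : Int) : Decidable (Pre_tuples_native_py S k) := by unfold Pre_tuples_native_py; infer_instance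
def pvWitness_tuples_native_py : List Int × Int := ([1, 2, 2], 2)

def Spec_tuples_native_py (S : List Int) (k : Int) (out : List (List Int)) : Prop := out = tuples_native_py_alt S k
instance (S : List Int) (k : Int) (out : List (List Int)) : Decidable (Spec_tuples_native_py S k out) := by unfold Spec_tuples_native_py; infer_instance

-- ===== CLAIM (what is proved, stated in full; the proofs are below) =====
def Claim_equal_tuples_native_py : Prop := ∀ (S : List Int) (k : Int), Dom_tuples_native_py S k → Pre_tuples_native_py S k → Spec_tuples_native_py S k (tuples_native_py S k)

-- ===== LEMMAS AND PROOFS =====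
-- one iteration of B's loop
theorem alt_succ (S : List Int) (n : Nat) :
    (List.range (n + 1)).foldl (fun levels _ => S.flatMap (fun s => levels.map (fun x => x ++ [s]))) [[]] =
    S.flatMap (fun s => ((List.range n).foldl (fun levels _ => S.flatMap (fun s => levels.map (fun x => x ++ [s]))) [[]]).map (fun x => x ++ [s])) := by
  rw [List.range_succ, List.foldl_append]
  rfl

theorem main_lemma (S : List Int) : ∀ (n : Nat),
    tuples_native_py S ((n : Int) + 1) =
    (List.range (n + 1)).foldl (fun levels _ => S.flatMap (fun s => levels.map (fun x => x ++ [s]))) [[]] := by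
  intro n
  induction n with
  | zero =>
      rw [alt_succ]
      simp [tuples_native_py, List.flatMap]
      induction S with
      | nil => rfl
      | cons a t iht => simp [iht]
  | succ m ih =>
      rw [alt_succ, tuples_native_py]
      push_cast
      have h0 : ¬ ((m : Int) + 1 + 1 ≤ 0) := by omega
      have h1 : ¬ ((m : Int) + 1 + 1 = 1) := by omega
      rw [if_neg h0, if_neg h1]
      have h2 : (m : Int) + 1 + 1 - 1 = (m : Int) + 1 := by omega
      rw [h2, ih, PySem.List.foldl_append_eq_flatMap]
      simp

-- ===== VERDICT (by name: the statement is the Claim_ definition above) =====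
theorem tuples_native_py_spec : Claim_equal_tuples_native_py := by
  intro S k _ _
  unfold Spec_tuples_native_py tuples_native_py_alt
  by_cases hk : k ≤ 0
  · have : k.toNat = 0 := by omega
    rw [this]
    unfold tuples_native_py
    rw [if_pos hk]
    rfl
  · have hn : k = ((k.toNat - 1 : Nat) : Int) + 1 := by omega
    have hn2 : k.toNat = (k.toNat - 1) + 1 := by omega
    rw [hn, hn2, main_lemma]
    congr 1
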